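-- pv_equiv track=rewrite | github.com/thiadeliria/KenKen | tests.py | div_check
-- ===== SOURCE A (Python) =====
-- import itertools
--
-- def div_check(values, target):
--         for perm in itertools.permutations(values):
--             #calculate value
--             result = perm[0]
--             i = 1
--             while(i < len(values)):
--                 result //= perm[i]
--                 i += 1
--             if result == target:
--                 return True
--         return False
-- ===== SOURCE B (Python) =====
-- def div_check(values, target):
--     # DFS over (current value, remaining elements), pruning duplicate choices at
--     # each level (equal elements lead to identical subtrees), instead of
--     # materialising and re-evaluating every permutation.
--     def go(val, rest):
--         if not rest:
--             return val == target
--         for j in range(len(rest)):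
--             if rest[j] in rest[:j]:
--                 continue
--             if go(val // rest[j], rest[:j] + rest[j + 1:]):
--                 return True
--         return False
--
--     for i in range(len(values)):
--         if values[i] in values[:i]:
--             continue
--         if go(values[i], values[:i] + values[i + 1:]):
--             return True
--     return False
-- ===== Notes on version B (the rewrite author's own statement) =====
-- stated objective: alternative
-- what changed: Replaces enumeration of all n! permutations (re-evaluating each from scratch) by a backtracking DFS over (current value, remaining elements) that shares division prefixes and skips duplicate choices at each level, collapsing the subtrees of equal elements.
-- outside the precondition, e.g. on div_check([0, 5], 0): A returns True, B returns True
import Mathlib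
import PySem

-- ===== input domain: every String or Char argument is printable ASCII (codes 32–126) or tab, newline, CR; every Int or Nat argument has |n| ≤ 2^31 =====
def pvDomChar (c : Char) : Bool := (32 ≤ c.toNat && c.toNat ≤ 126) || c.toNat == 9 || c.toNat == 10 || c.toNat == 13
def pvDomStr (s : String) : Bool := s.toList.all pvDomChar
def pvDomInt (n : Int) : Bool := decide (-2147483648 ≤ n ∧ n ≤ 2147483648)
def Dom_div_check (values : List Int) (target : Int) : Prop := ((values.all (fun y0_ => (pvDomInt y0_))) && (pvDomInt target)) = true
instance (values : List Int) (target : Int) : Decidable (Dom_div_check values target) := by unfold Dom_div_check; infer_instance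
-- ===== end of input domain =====

-- B replaces A's n!-permutation enumeration by a backtracking DFS over
-- (current value, remaining elements) that prunes duplicate choices per level;
-- return values are proved equal on Pre_.

-- ===== PORT A =====
-- for perm in permutations(values): result = perm[0]; result //= perm[i] for i in 1..len(values)-1; True on match
def div_check (values : List Int) (target : Int) : Bool :=
  values.permutations.any (fun perm =>
    let result := (PySem.List.pyRange 1 (values.length : Int) 1).foldl
      (fun r i => PySem.Int.floordiv r (PySem.List.pyGetD perm i 0))
      (PySem.List.pyGetD perm 0 0)
    result == target)

-- ===== PORT B =====
-- go(val, rest); fuel = rest.length makes the recursion structural (at fuel 0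
-- the remaining list is empty).  rest[:j] / rest[j+1:] are List.take / List.drop
-- (exact here: the bounds are nonnegative), rest[j] is getD with j < rest.length.
def div_check_go (target : Int) : Nat → Int → List Int → Bool
  | 0, val, _rest => val == target
  | n + 1, val, rest =>
    (List.range rest.length).any (fun j =>
      !((rest.take j).contains (rest.getD j 0)) &&
      div_check_go target n (PySem.Int.floordiv val (rest.getD j 0))
        (rest.take j ++ rest.drop (j + 1)))

def div_check_alt (values : List Int) (target : Int) : Bool :=
  (List.range values.length).any (fun i =>
    !((values.take i).contains (values.getD i 0)) &&
    div_check_go target (values.length - 1) (values.getD i 0)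
      (values.take i ++ values.drop (i + 1)))

-- ===== PRECONDITION & SPEC =====
-- Pre_ excludes exactly the inputs on which the Python A raises: [] (IndexError
-- on perm[0]) and lists of length ≥ 2 containing 0, on which every division
-- chain hits a zero divisor (ZeroDivisionError) except when the unique 0 leads
-- and the running value stays 0: on those excluded inputs A returns True and B
-- returns True as well (see the cite).
def Pre_div_check (values : List Int) (target : Int) : Prop :=
  values ≠ [] ∧ ((0 : Int) ∈ values → values.length = 1)
instance (values : List Int) (target : Int) : Decidable (Pre_div_check values target) := by
  unfold Pre_div_check; infer_instance

def pvWitness_div_check : List Int × Int := ([7, -2, 3], -2)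

def Spec_div_check (values : List Int) (target : Int) (out : Bool) : Prop := out = div_check_alt values target
instance (values : List Int) (target : Int) (out : Bool) : Decidable (Spec_div_check values target out) := by unfold Spec_div_check; infer_instance

-- ===== CLAIM (what is proved, stated in full; the proofs are below) =====
def Claim_equal_div_check : Prop := ∀ (values : List Int) (target : Int), Dom_div_check values target → Pre_div_check values target → Spec_div_check values target (div_check values target)

-- ===== LEMMAS AND PROOFS =====

-- erasing the first occurrence of l[j] is removing index j
theorem erase_getD_of_first_occ : ∀ (l : List Int) (j : Nat), j < l.length →
    l.getD j 0 ∉ l.take j → l.erase (l.getD j 0) = l.take j ++ l.drop (j + 1) := by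
  intro l
  induction l with
  | nil => intro j hj; simp at hj
  | cons x t ih =>
    intro j hj hmem
    cases j with
    | zero => simp [List.erase_cons_head]
    | succ j =>
      simp only [List.take_succ_cons, List.mem_cons, not_or] at hmem
      obtain ⟨hne, hmem⟩ := hmem
      simp only [List.getD_cons_succ] at hne hmem ⊢
      rw [List.erase_cons_tail (a := t.getD j 0) (b := x)
        (by simpa using fun h => hne h.symm)]
      simp only [List.take_succ_cons, List.drop_succ_cons, List.cons_append,
        List.cons.injEq, true_and]
      exact ih j (by simpa using hj) hmem

-- the pruned index loop visits exactly one j per distinct a ∈ rest, and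
-- removing index j is then erasing a
theorem choose_iff (P : Int → List Int → Prop) (rest : List Int) :
    (∃ j, j < rest.length ∧ rest.getD j 0 ∉ rest.take j ∧
        P (rest.getD j 0) (rest.take j ++ rest.drop (j + 1)))
      ↔ ∃ a ∈ rest, P a (rest.erase a) := by
  constructor
  · rintro ⟨j, hj, hfirst, hP⟩
    refine ⟨rest.getD j 0, ?_, ?_⟩
    · rw [List.getD_eq_getElem (d := (0:Int)) rest hj]; exact List.getElem_mem hj
    · rw [erase_getD_of_first_occ rest j hj hfirst]; exact hP
  · rintro ⟨a, ha, hP⟩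
    have hlt : List.idxOf a rest < rest.length := List.idxOf_lt_length_of_mem ha
    have hget : rest.getD (List.idxOf a rest) 0 = a := by
      rw [List.getD_eq_getElem (d := (0:Int)) rest hlt]
      exact List.getElem_idxOf hlt
    have hfirst : rest.getD (List.idxOf a rest) 0 ∉ rest.take (List.idxOf a rest) := by
      rw [hget, List.mem_take_iff_idxOf_lt ha]
      omega
    refine ⟨List.idxOf a rest, hlt, hfirst, ?_⟩
    rw [← erase_getD_of_first_occ rest (List.idxOf a rest) hlt hfirst, hget]
    exact hP

-- splitting off the head of a permutation
theorem exists_perm_cons (rest : List Int) (F : Int → List Int → Prop) :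
    (∃ (a : Int) (l : List Int), (a :: l).Perm rest ∧ F a l)
      ↔ ∃ a ∈ rest, ∃ l : List Int, l.Perm (rest.erase a) ∧ F a l := by
  constructor
  · rintro ⟨a, l, hp, hF⟩
    have ha : a ∈ rest := hp.mem_iff.mp (List.mem_cons_self ..)
    exact ⟨a, ha, l, (hp.trans (List.perm_cons_erase ha)).cons_inv, hF⟩
  · rintro ⟨a, ha, l, hp, hF⟩
    exact ⟨a, l, (hp.cons a).trans (List.perm_cons_erase ha).symm, hF⟩

-- the DFS decides: "some ordering of rest floor-divides val down to target"
theorem go_iff (target : Int) : ∀ (n : Nat) (rest : List Int) (val : Int), rest.length = n →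
    (div_check_go target n val rest = true ↔
      ∃ l : List Int, l.Perm rest ∧ l.foldl PySem.Int.floordiv val = target) := by
  intro n
  induction n with
  | zero =>
    intro rest val hlen
    have hnil : rest = [] := List.eq_nil_of_length_eq_zero hlen
    subst hnil
    simp [div_check_go, List.perm_nil]
  | succ n ih =>
    intro rest val hlen
    have hne : rest ≠ [] := by intro h; subst h; simp at hlen
    simp only [div_check_go, List.any_eq_true, List.mem_range, Bool.and_eq_true,
      Bool.not_eq_true', List.contains_eq_mem, decide_eq_false_iff_not]
    have step1 := choose_iff
      (fun a r => div_check_go target n (PySem.Int.floordiv val a) r = true) rest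
    constructor
    · rintro ⟨j, hj, hg, hgo⟩
      obtain ⟨a, ha, hgo⟩ := step1.mp ⟨j, hj, hg, hgo⟩
      have hlen' : (rest.erase a).length = n := by
        rw [List.length_erase_of_mem ha]; omega
      obtain ⟨l, hp, hfold⟩ := (ih _ _ hlen').mp hgo
      exact ⟨a :: l, (hp.cons a).trans (List.perm_cons_erase ha).symm, hfold⟩
    · rintro ⟨l, hp, hfold⟩
      obtain ⟨a, l', rfl⟩ : ∃ a l', l = a :: l' := by
        cases l with
        | nil => exact absurd hp.symm.eq_nil hne
        | cons a l' => exact ⟨a, l', rfl⟩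
      have ha : a ∈ rest := hp.mem_iff.mp (List.mem_cons_self ..)
      have hlen' : (rest.erase a).length = n := by
        rw [List.length_erase_of_mem ha]; omega
      have hgo : div_check_go target n (PySem.Int.floordiv val a) (rest.erase a) = true :=
        (ih _ _ hlen').mpr ⟨l', (hp.trans (List.perm_cons_erase ha)).cons_inv, hfold⟩
      obtain ⟨j, hj, h1, h2⟩ := step1.mpr ⟨a, ha, hgo⟩
      exact ⟨j, hj, h1, h2⟩

-- A's while-loop on a nonempty permutation is a foldl over its tail
theorem A_inner (values : List Int) (a : Int) (l : List Int)
    (hlen : values.length = (a :: l).length) :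
    ((PySem.List.pyRange 1 (values.length : Int) 1).foldl
      (fun r i => PySem.Int.floordiv r (PySem.List.pyGetD (a :: l) i 0))
      (PySem.List.pyGetD (a :: l) 0 0)) = l.foldl PySem.Int.floordiv a := by
  rw [hlen]
  have h := PySem.List.foldl_pyRange_pyGetD' (α := Int) (β := Int) (a :: l) 0
    PySem.Int.floordiv (PySem.List.pyGetD (a :: l) 0 0) (show (0:Int) ≤ 1 by omega)
  exact h.trans (by simp [PySem.List.pyGetD])

theorem B_iff (values : List Int) (target : Int) :
    div_check_alt values target = true ↔
      ∃ a ∈ values, ∃ l : List Int, l.Perm (values.erase a) ∧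
        l.foldl PySem.Int.floordiv a = target := by
  rw [div_check_alt]
  simp only [List.any_eq_true, List.mem_range, Bool.and_eq_true, Bool.not_eq_true',
    List.contains_eq_mem, decide_eq_false_iff_not]
  have step1 := choose_iff
    (fun a r => div_check_go target (values.length - 1) a r = true) values
  constructor
  · rintro ⟨i, hi, hg, hgo⟩
    obtain ⟨a, ha, hgo⟩ := step1.mp ⟨i, hi, hg, hgo⟩
    have hlen' : (values.erase a).length = values.length - 1 :=
      List.length_erase_of_mem ha
    obtain ⟨l, hp, hfold⟩ := (go_iff target _ _ _ hlen').mp hgo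
    exact ⟨a, ha, l, hp, hfold⟩
  · rintro ⟨a, ha, l, hp, hfold⟩
    have hlen' : (values.erase a).length = values.length - 1 :=
      List.length_erase_of_mem ha
    have hgo := (go_iff target _ _ a hlen').mpr ⟨l, hp, hfold⟩
    obtain ⟨j, hj, h1, h2⟩ := step1.mpr ⟨a, ha, hgo⟩
    exact ⟨j, hj, h1, h2⟩

theorem A_iff (values : List Int) (target : Int) (hne : values ≠ []) :
    div_check values target = true ↔
      ∃ a ∈ values, ∃ l : List Int, l.Perm (values.erase a) ∧
        l.foldl PySem.Int.floordiv a = target := by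
  rw [div_check]
  rw [← exists_perm_cons values (fun a l => l.foldl PySem.Int.floordiv a = target)]
  simp only [List.any_eq_true, beq_iff_eq]
  constructor
  · rintro ⟨p, hmem, hres⟩
    have hp : p.Perm values := List.mem_permutations.mp hmem
    obtain ⟨a, l, rfl⟩ : ∃ a l, p = a :: l := by
      cases p with
      | nil => exact absurd hp.symm.eq_nil hne
      | cons a l => exact ⟨a, l, rfl⟩
    refine ⟨a, l, hp, ?_⟩
    rw [← A_inner values a l hp.length_eq.symm]
    exact hres
  · rintro ⟨a, l, hp, hfold⟩
    refine ⟨a :: l, List.mem_permutations.mpr hp, ?_⟩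
    rw [A_inner values a l hp.length_eq.symm]
    exact hfold

-- ===== VERDICT (by name: the statement is the Claim_ definition above) =====
theorem div_check_spec : Claim_equal_div_check := by
  intro values target _hdom hpre
  unfold Spec_div_check
  exact Bool.eq_iff_iff.mpr ((A_iff values target hpre.1).trans (B_iff values target).symm)
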